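-- pv_equiv track=rewrite | github.com/y-f-li/AI-Movie-Recommender | src/modules/extractors.py | _normalize_signal_sequence_aliases
-- ===== SOURCE A (Python) =====
-- SCI_FI_SIGNAL_ALIASES = {"sci-fi", "scifi"}
--
-- def _normalize_signal_sequence_aliases(tokens):
--     normalized_tokens = []
--     cleaned_tokens = [str(tok).strip() for tok in (tokens or []) if str(tok).strip()]
--     index = 0
--     while index < len(cleaned_tokens):
--         current = cleaned_tokens[index]
--         current_lower = current.lower()
--         next_lower = cleaned_tokens[index + 1].lower() if index + 1 < len(cleaned_tokens) else None
--
--         if current_lower in SCI_FI_SIGNAL_ALIASES: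
--             normalized_tokens.append("science fiction")
--             index += 1
--             continue
--
--         if current_lower == "sci" and next_lower == "fi":
--             normalized_tokens.append("science fiction")
--             index += 2
--             continue
--
--         normalized_tokens.append(current)
--         index += 1
--
--     return normalized_tokens
-- ===== SOURCE B (Python) =====
-- SCI_FI_SIGNAL_ALIASES = {"sci-fi", "scifi"}
--
-- def _normalize_signal_sequence_aliases(tokens):
--     # One forward pass with a "pending sci" slot (look-behind) instead of
--     # index-based look-ahead and jumping; cleaning is done inline.
--     out = []
--     pending = None  # an original cleaned token whose lowercase is "sci"
--     for tok in (tokens or []):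
--         t = str(tok).strip()
--         if not t:
--             continue
--         low = t.lower()
--         if pending is not None:
--             if low == "fi":
--                 out.append("science fiction")
--                 pending = None
--                 continue
--             out.append(pending)
--             pending = None
--         if low in SCI_FI_SIGNAL_ALIASES:
--             out.append("science fiction")
--         elif low == "sci":
--             pending = t
--         else:
--             out.append(t)
--     if pending is not None:
--         out.append(pending)
--     return out
-- ===== Notes on version B (the rewrite author's own statement) =====
-- stated objective: alternative
-- what changed: Replaced the index-based while-loop with look-ahead (reading tokens[index+1] and jumping index by 2) and a separate pre-cleaning pass by a single forward pass that cleans each token inline and keeps a one-slot 'pending sci' look-behind buffer, flushed at end of input.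
import Mathlib
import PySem

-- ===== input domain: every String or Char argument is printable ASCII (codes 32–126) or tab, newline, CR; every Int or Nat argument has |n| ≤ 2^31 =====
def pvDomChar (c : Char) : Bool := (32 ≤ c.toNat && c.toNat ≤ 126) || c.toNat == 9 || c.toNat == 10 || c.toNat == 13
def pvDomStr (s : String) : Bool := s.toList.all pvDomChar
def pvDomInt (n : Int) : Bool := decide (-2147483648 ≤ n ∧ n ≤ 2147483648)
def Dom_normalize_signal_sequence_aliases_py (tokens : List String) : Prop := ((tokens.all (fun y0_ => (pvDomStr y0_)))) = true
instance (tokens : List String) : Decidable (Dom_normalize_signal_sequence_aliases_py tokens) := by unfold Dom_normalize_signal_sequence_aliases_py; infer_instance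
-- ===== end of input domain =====

-- B replaces A's pre-cleaning pass + index look-ahead/jump loop with a single
-- inline-cleaning pass carrying a one-slot pending-"sci" look-behind buffer (objective: alternative).

-- ===== PORT A =====
-- the while-loop over cleaned_tokens, as structural recursion on the suffix from `index`
-- (index += 1 drops one element, index += 2 drops two; next_lower is the optional look-ahead)
def pvLoopA : List String → List String
  | [] => []
  | [current] =>
    let current_lower := PySem.Str.lower current
    let next_lower : Option String := none
    if current_lower = "sci-fi" ∨ current_lower = "scifi" then
      "science fiction" :: pvLoopA []
    else if current_lower = "sci" ∧ next_lower = some "fi" then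
      "science fiction" :: pvLoopA []
    else
      current :: pvLoopA []
  | current :: nxt :: rest2 =>
    let current_lower := PySem.Str.lower current
    let next_lower : Option String := some (PySem.Str.lower nxt)
    if current_lower = "sci-fi" ∨ current_lower = "scifi" then
      "science fiction" :: pvLoopA (nxt :: rest2)
    else if current_lower = "sci" ∧ next_lower = some "fi" then
      "science fiction" :: pvLoopA rest2
    else
      current :: pvLoopA (nxt :: rest2)

def normalize_signal_sequence_aliases_py (tokens : List String) : List String :=
  let cleaned_tokens := (tokens.map (fun tok => PySem.Str.strip tok)).filter (fun t => t ≠ "")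
  pvLoopA cleaned_tokens

-- ===== PORT B =====
-- the for-loop over raw tokens with the pending slot; the trailing flush is the [] case
def pvLoopB (pending : Option String) : List String → List String
  | [] =>
    match pending with
    | some p => [p]
    | none => []
  | tok :: rest =>
    let t := PySem.Str.strip tok
    if t = "" then pvLoopB pending rest
    else
      let low := PySem.Str.lower t
      match pending with
      | some p =>
        if low = "fi" then "science fiction" :: pvLoopB none rest
        else
          p :: (if low = "sci-fi" ∨ low = "scifi" then "science fiction" :: pvLoopB none rest
                else if low = "sci" then pvLoopB (some t) rest
                else t :: pvLoopB none rest)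
      | none =>
        if low = "sci-fi" ∨ low = "scifi" then "science fiction" :: pvLoopB none rest
        else if low = "sci" then pvLoopB (some t) rest
        else t :: pvLoopB none rest

def normalize_signal_sequence_aliases_py_alt (tokens : List String) : List String :=
  pvLoopB none tokens

-- ===== PRECONDITION & SPEC =====
def Spec_normalize_signal_sequence_aliases_py (tokens : List String) (out : List String) : Prop := out = normalize_signal_sequence_aliases_py_alt tokens
instance (tokens : List String) (out : List String) : Decidable (Spec_normalize_signal_sequence_aliases_py tokens out) := by unfold Spec_normalize_signal_sequence_aliases_py; infer_instance

-- ===== CLAIM (what is proved, stated in full; the proofs are below) =====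
def Claim_equal_normalize_signal_sequence_aliases_py : Prop := ∀ (tokens : List String), Dom_normalize_signal_sequence_aliases_py tokens → Spec_normalize_signal_sequence_aliases_py tokens (normalize_signal_sequence_aliases_py tokens)

-- ===== LEMMAS AND PROOFS =====

-- pvLoopB over cleaned tokens, without the inline stripping
def pvLoopBC (pending : Option String) : List String → List String
  | [] =>
    match pending with
    | some p => [p]
    | none => []
  | t :: rest =>
    let low := PySem.Str.lower t
    match pending with
    | some p =>
      if low = "fi" then "science fiction" :: pvLoopBC none rest
      else
        p :: (if low = "sci-fi" ∨ low = "scifi" then "science fiction" :: pvLoopBC none rest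
              else if low = "sci" then pvLoopBC (some t) rest
              else t :: pvLoopBC none rest)
    | none =>
      if low = "sci-fi" ∨ low = "scifi" then "science fiction" :: pvLoopBC none rest
      else if low = "sci" then pvLoopBC (some t) rest
      else t :: pvLoopBC none rest

theorem pvLoopB_eq_BC (tokens : List String) : ∀ pending,
    pvLoopB pending tokens = pvLoopBC pending ((tokens.map (fun tok => PySem.Str.strip tok)).filter (fun t => t ≠ "")) := by
  induction tokens with
  | nil => intro pending; rfl
  | cons tok rest ih =>
    intro pending
    by_cases h : PySem.Str.strip tok = ""
    · simp [pvLoopB, h, ih]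
    · cases pending with
      | none => simp [pvLoopB, pvLoopBC, h, ih]
      | some p => simp [pvLoopB, pvLoopBC, h, ih]

-- the invariant tying the pending slot to A's look-ahead: with no pending token the two
-- machines agree, and a pending token p (necessarily lowercasing to "sci") stands for
-- A not yet having consumed p
theorem pvLoopBC_eq_A (C : List String) :
    pvLoopBC none C = pvLoopA C ∧
      ∀ p, PySem.Str.lower p = "sci" → pvLoopBC (some p) C = pvLoopA (p :: C) := by
  induction C with
  | nil =>
    constructor
    · simp [pvLoopBC, pvLoopA]
    · intro p hp
      simp [pvLoopBC, pvLoopA, hp]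
  | cons t rest ih =>
    have hnone : pvLoopBC none (t :: rest) = pvLoopA (t :: rest) := by
      rcases rest with _ | ⟨n, rest2⟩
      · by_cases ha : PySem.Str.lower t = "sci-fi" ∨ PySem.Str.lower t = "scifi"
        · simp [pvLoopBC, pvLoopA, ha]
        · by_cases hs : PySem.Str.lower t = "sci"
          · simp [pvLoopBC, pvLoopA, hs]
          · simp [pvLoopBC, pvLoopA, hs]
      · by_cases ha : PySem.Str.lower t = "sci-fi" ∨ PySem.Str.lower t = "scifi"
        · simp only [pvLoopBC, pvLoopA, ha, if_true]
          rw [← ih.1]; simp [pvLoopBC]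
        · by_cases hs : PySem.Str.lower t = "sci"
          · have hB : pvLoopBC none (t :: n :: rest2) = pvLoopBC (some t) (n :: rest2) := by
              simp [pvLoopBC, hs]
            rw [hB, ih.2 t hs]
          · simp only [pvLoopBC, pvLoopA, ha, hs, if_false]
            rw [← ih.1]; simp [pvLoopBC]
    refine ⟨hnone, fun p hp => ?_⟩
    have hpa : ¬ (PySem.Str.lower p = "sci-fi" ∨ PySem.Str.lower p = "scifi") := by
      rw [hp]; decide
    by_cases hf : PySem.Str.lower t = "fi"
    · simp [pvLoopBC, pvLoopA, hf, hp, ih.1]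
    · have hA : pvLoopA (p :: t :: rest) = p :: pvLoopA (t :: rest) := by
        simp [pvLoopA, hp, hf]
      rw [hA, ← hnone]
      simp [pvLoopBC, hf]

-- ===== VERDICT (by name: the statement is the Claim_ definition above) =====
theorem normalize_signal_sequence_aliases_py_spec : Claim_equal_normalize_signal_sequence_aliases_py := by
  intro tokens _
  unfold Spec_normalize_signal_sequence_aliases_py normalize_signal_sequence_aliases_py normalize_signal_sequence_aliases_py_alt
  rw [pvLoopB_eq_BC, (pvLoopBC_eq_A _).1]
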